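-- pv_equiv track=rewrite | github.com/vladisnut/codetester | src/testing/utils.py | parse_test_data_as_stream
-- ===== SOURCE A (Python) =====
-- def parse_test_data(test_data: str) -> list[str]:
--     lines = [line.strip() for line in test_data.strip().splitlines()]
--     if not lines:
--         return []
--
--     lines = [
--         lines[i].strip()
--         for i in range(len(lines))
--         if i == 0 or lines[i].strip() or lines[i - 1].strip()
--     ]
--     return "\n".join(lines).split("\n\n")
--
-- def parse_test_data_as_stream(test_data: str) -> list[tuple[str, str]]:
--     """
--     Парсинг тестовых данных как поток аргументов.
--     Аргументы можно писать как в одной строке, так и разделив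
--     их на несколько строк.
--     Входные и выходные данные разделяются минимум одной пустой строкой.
--     Наборы тестовых данных разделяются каждой второй последовательностью,
--     состоящей минимум из одной пустой строки.
--     """
--     test_data_list = parse_test_data(test_data)
--     if not test_data_list:
--         return []
--
--     if len(test_data_list) % 2 != 0:
--         test_data_list.append("")
--
--     return [
--         (test_data_list[i - 1], test_data_list[i])
--         for i in range(1, len(test_data_list), 2)
--     ]
-- ===== SOURCE B (Python) =====
-- def parse_test_data_as_stream(test_data: str) -> list[tuple[str, str]]:
--     blocks = []
--     current = []
--     for raw in test_data.strip().splitlines():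
--         line = raw.strip()
--         if line:
--             current.append(line)
--         elif current:
--             blocks.append("\n".join(current))
--             current = []
--     if current:
--         blocks.append("\n".join(current))
--     if not blocks:
--         return []
--     if len(blocks) % 2 != 0:
--         blocks.append("")
--     return [(blocks[i], blocks[i + 1]) for i in range(0, len(blocks), 2)]
-- ===== Notes on version B (the rewrite author's own statement) =====
-- stated objective: simpler
-- what changed: A collapses blank runs with an index-based filter over line indices, joins with newlines and re-splits on double newlines, then pairs with range(1,n,2); B makes one grouping pass that accumulates consecutive non-blank stripped lines into blocks directly and pairs adjacent blocks with range(0,n,2).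
import Mathlib
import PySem

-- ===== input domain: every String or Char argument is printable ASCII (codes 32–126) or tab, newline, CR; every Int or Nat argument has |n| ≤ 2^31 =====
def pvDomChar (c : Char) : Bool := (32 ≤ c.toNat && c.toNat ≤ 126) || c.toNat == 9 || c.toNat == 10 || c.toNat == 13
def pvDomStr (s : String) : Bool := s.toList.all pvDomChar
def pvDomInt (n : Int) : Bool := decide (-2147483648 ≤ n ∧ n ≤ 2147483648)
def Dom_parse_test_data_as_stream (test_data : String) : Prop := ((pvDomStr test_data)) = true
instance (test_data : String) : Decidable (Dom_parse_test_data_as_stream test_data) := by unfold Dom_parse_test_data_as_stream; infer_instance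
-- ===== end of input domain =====

-- B replaces A's collapse/join-then-resplit pipeline by a single grouping pass over the lines (objective: simpler).

-- ===== PORT A =====
-- helper parse_test_data of the same module, transliterated
def parse_test_data (test_data : String) : List String :=
  let lines := (PySem.Str.splitlines (PySem.Str.strip test_data)).map (fun line => PySem.Str.strip line)
  if lines = [] then []
  else
    let lines2 := ((PySem.List.pyRange 0 (lines.length : Int) 1).filter (fun i =>
        (i == 0) || !((PySem.Str.strip ((PySem.List.pyGet? lines i).getD "")) == "")
                 || !((PySem.Str.strip ((PySem.List.pyGet? lines (i - 1)).getD "")) == ""))).map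
      (fun i => PySem.Str.strip ((PySem.List.pyGet? lines i).getD ""))
    (PySem.Str.split? (PySem.Str.join "\n" lines2) "\n\n").getD []


def parse_test_data_as_stream (test_data : String) : List (String × String) :=
  let tdl := parse_test_data test_data
  if tdl = [] then []
  else
    let tdl2 := if tdl.length % 2 ≠ 0 then tdl ++ [""] else tdl
    (PySem.List.pyRange 1 (tdl2.length : Int) 2).map
      (fun i => ((PySem.List.pyGet? tdl2 (i - 1)).getD "", (PySem.List.pyGet? tdl2 i).getD ""))


-- ===== PORT B =====
-- loop body of B's single grouping pass
def pvGroupStep (st : List String × List String) (raw : String) : List String × List String :=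
  let line := PySem.Str.strip raw
  if line ≠ "" then (st.1, st.2 ++ [line])
  else if st.2 ≠ [] then (st.1 ++ [PySem.Str.join "\n" st.2], [])
  else st


def parse_test_data_as_stream_alt (test_data : String) : List (String × String) :=
  let st := (PySem.Str.splitlines (PySem.Str.strip test_data)).foldl pvGroupStep ([], [])
  let blocks := if st.2 ≠ [] then st.1 ++ [PySem.Str.join "\n" st.2] else st.1
  if blocks = [] then []
  else
    let blocks2 := if blocks.length % 2 ≠ 0 then blocks ++ [""] else blocks
    (PySem.List.pyRange 0 (blocks2.length : Int) 2).map
      (fun i => ((PySem.List.pyGet? blocks2 i).getD "", (PySem.List.pyGet? blocks2 (i + 1)).getD ""))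


-- ===== PRECONDITION & SPEC =====
def Spec_parse_test_data_as_stream (test_data : String) (out : List (String × String)) : Prop := out = parse_test_data_as_stream_alt test_data
instance (test_data : String) (out : List (String × String)) : Decidable (Spec_parse_test_data_as_stream test_data out) := by unfold Spec_parse_test_data_as_stream; infer_instance

-- ===== CLAIM (what is proved, stated in full; the proofs are below) =====
def Claim_equal_parse_test_data_as_stream : Prop := ∀ (test_data : String), Dom_parse_test_data_as_stream test_data → Spec_parse_test_data_as_stream test_data (parse_test_data_as_stream test_data)

-- ===== LEMMAS AND PROOFS =====

def pvIsB (c : Char) : Bool :=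
  have n := c.toNat
  decide (n = 10) || decide (n = 13) || decide (n = 11) || decide (n = 12) || decide (n = 28) ||
    decide (n = 29) || decide (n = 30) || decide (n = 133) || decide (n = 8232) || decide (n = 8233)

def pvLines : List Char → List Char → List (List Char)
  | [], cur => if cur.isEmpty then [] else [cur.reverse]
  | c :: rest, cur =>
    if c = '\x0d' ∧ rest.head? = some '\n' then cur.reverse :: pvLines (rest.drop 1) []
    else if pvIsB c then cur.reverse :: pvLines rest []
    else pvLines rest (c :: cur)
termination_by s _ => s.length
decreasing_by all_goals simp

theorem pvLines_nil (cur : List Char) :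
    pvLines [] cur = if cur.isEmpty then [] else [cur.reverse] := by
  rw [pvLines.eq_def]

theorem pvLines_cons (c : Char) (rest cur : List Char) :
    pvLines (c :: rest) cur =
      if c = '\x0d' ∧ rest.head? = some '\n' then cur.reverse :: pvLines (rest.drop 1) []
      else if pvIsB c then cur.reverse :: pvLines rest []
      else pvLines rest (c :: cur) := by
  rw [pvLines.eq_def]

theorem pvGoEq : ∀ (s cur : List Char) (acc : List (List Char)),
    PySem.Chars.splitlines.go pvIsB s cur acc = acc.reverse ++ pvLines s cur := by
  intro s cur acc
  induction s, cur using pvLines.induct generalizing acc with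
  | case1 cur h => rw [PySem.Chars.splitlines.go.eq_def]; simp_all [pvLines_nil]
  | case2 cur h => rw [PySem.Chars.splitlines.go.eq_def]; simp_all [pvLines_nil]
  | case3 c rest cur hif ih =>
    obtain ⟨hc, hh⟩ := hif
    subst hc
    cases rest with
    | nil => simp at hh
    | cons d rest' =>
      simp at hh; subst hh
      rw [PySem.Chars.splitlines.go.eq_def]
      simp only [List.drop_succ_cons, List.drop_zero] at ih
      simp [pvLines_cons, ih]
  | case4 c rest cur hif hb ih =>
    rw [PySem.Chars.splitlines.go.eq_def]
    split
    · simp_all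
    · rename_i r' heq
      rw [List.cons.injEq] at heq
      exact absurd (by simp [heq.1, heq.2] : c = '\x0d' ∧ rest.head? = some '\n') hif
    · rename_i c' r' heq
      rw [List.cons.injEq] at heq
      obtain ⟨h1, h2⟩ := heq; subst h1; subst h2
      rw [if_pos hb, ih, pvLines_cons, if_neg hif, if_pos hb]; simp
  | case5 c rest cur hif hb ih =>
    rw [PySem.Chars.splitlines.go.eq_def]
    split
    · simp_all
    · rename_i r' heq
      rw [List.cons.injEq] at heq
      exact absurd (by simp [heq.1, heq.2] : c = '\x0d' ∧ rest.head? = some '\n') hif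
    · rename_i c' r' heq
      rw [List.cons.injEq] at heq
      obtain ⟨h1, h2⟩ := heq; subst h1; subst h2
      rw [if_neg (by simp_all), ih, pvLines_cons, if_neg hif, if_neg (by simp_all)]

theorem pvSplitlinesEq (s : List Char) : PySem.Chars.splitlines s = pvLines s [] := by
  have h : PySem.Chars.splitlines s = PySem.Chars.splitlines.go pvIsB s [] [] := rfl
  rw [h, pvGoEq]; simp

theorem pvIsB_isspace (c : Char) (h : pvIsB c = true) : PySem.Chars.isspace c = true := by
  simp [pvIsB] at h
  simp [PySem.Chars.isspace]
  omega

theorem pvIsB_newline : pvIsB '\n' = true := by decide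

theorem pvLines_first : ∀ (s cur : List Char), cur ≠ [] →
    ∃ pre t, pvLines s cur = (cur.reverse ++ pre) :: t := by
  intro s cur hcur
  induction s, cur using pvLines.induct with
  | case1 cur h => simp_all
  | case2 cur h => exact ⟨[], [], by simp [pvLines_nil, h]⟩
  | case3 c rest cur hif ih =>
    exact ⟨[], pvLines (rest.drop 1) [], by rw [pvLines_cons, if_pos hif]; simp⟩
  | case4 c rest cur hif hb ih =>
    exact ⟨[], pvLines rest [], by rw [pvLines_cons, if_neg hif, if_pos hb]; simp⟩
  | case5 c rest cur hif hb ih =>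
    obtain ⟨pre, t, h⟩ := ih (by simp)
    refine ⟨c :: pre, t, ?_⟩
    rw [pvLines_cons, if_neg hif, if_neg hb, h]
    simp

theorem pvLines_last : ∀ (s cur : List Char) (z : Char), s.getLast? = some z → pvIsB z = false →
    ∃ t w, pvLines s cur = t ++ [w ++ [z]] := by
  intro s cur z hz hnb
  induction s, cur using pvLines.induct generalizing z with
  | case1 cur h => simp_all
  | case2 cur h => simp_all
  | case3 c rest cur hif ih =>
    obtain ⟨hc, hh⟩ := hif
    subst hc
    cases rest with
    | nil => simp at hh
    | cons d rest' =>
      simp at hh; subst hh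
      cases rest' with
      | nil =>
        simp at hz; subst hz
        rw [pvIsB_newline] at hnb; exact absurd hnb (by simp)
      | cons e r =>
        simp only [List.drop_succ_cons, List.drop_zero] at ih
        have hz' : (e :: r).getLast? = some z := by
          rw [← hz]; simp [List.getLast?_cons_cons]
        obtain ⟨t, w, h⟩ := ih z hz' hnb
        refine ⟨cur.reverse :: t, w, ?_⟩
        rw [pvLines_cons, if_pos ⟨rfl, rfl⟩]
        simp only [List.drop_succ_cons, List.drop_zero, h]
        simp
  | case4 c rest cur hif hb ih =>
    cases rest with
    | nil =>
      simp at hz; subst hz; simp_all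
    | cons d r =>
      have hz' : (d :: r).getLast? = some z := by rw [← hz]; simp [List.getLast?_cons_cons]
      obtain ⟨t, w, h⟩ := ih z hz' hnb
      refine ⟨cur.reverse :: t, w, ?_⟩
      rw [pvLines_cons, if_neg hif, if_pos hb, h]; simp
  | case5 c rest cur hif hb ih =>
    cases rest with
    | nil =>
      simp at hz; subst hz
      refine ⟨[], cur.reverse, ?_⟩
      rw [pvLines_cons, if_neg hif, if_neg hb, pvLines_nil]
      simp
    | cons d r =>
      have hz' : (d :: r).getLast? = some z := by rw [← hz]; simp [List.getLast?_cons_cons]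
      obtain ⟨t, w, h⟩ := ih z hz' hnb
      exact ⟨t, w, by rw [pvLines_cons, if_neg hif, if_neg hb, h]⟩

theorem pvLines_nfree : ∀ (s cur : List Char), (∀ c ∈ cur, pvIsB c = false) →
    ∀ l ∈ pvLines s cur, ∀ c ∈ l, pvIsB c = false := by
  intro s cur hcur
  induction s, cur using pvLines.induct with
  | case1 cur h => simp_all [pvLines_nil]
  | case2 cur h =>
    rw [pvLines_nil, if_neg h]
    intro l hl c hc
    simp at hl; subst hl
    exact hcur c (by simpa using hc)
  | case3 c rest cur hif ih =>
    rw [pvLines_cons, if_pos hif]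
    intro l hl ch hch
    rcases List.mem_cons.mp hl with h | h
    · subst h; exact hcur ch (by simpa using hch)
    · exact ih (by simp) l h ch hch
  | case4 c rest cur hif hb ih =>
    rw [pvLines_cons, if_neg hif, if_pos hb]
    intro l hl ch hch
    rcases List.mem_cons.mp hl with h | h
    · subst h; exact hcur ch (by simpa using hch)
    · exact ih (by simp) l h ch hch
  | case5 c rest cur hif hb ih =>
    rw [pvLines_cons, if_neg hif, if_neg hb]
    refine ih ?_
    intro ch hch
    rcases List.mem_cons.mp hch with h | h
    · subst h; exact eq_false_of_ne_true hb
    · exact hcur ch h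

-- strip lemmas
theorem pvMemStrip {a : Char} {l : List Char} (h : a ∈ PySem.Chars.strip l) : a ∈ l := by
  simp only [PySem.Chars.strip, PySem.Chars.rstrip, PySem.Chars.lstrip] at h
  rw [List.mem_reverse] at h
  have h2 := (List.dropWhile_sublist _ ).mem h
  rw [List.mem_reverse] at h2
  exact (List.dropWhile_sublist _).mem h2

theorem pvStripNil {l : List Char} (h : PySem.Chars.strip l = []) :
    ∀ c ∈ l, PySem.Chars.isspace c = true := by
  simp only [PySem.Chars.strip, PySem.Chars.rstrip, PySem.Chars.lstrip] at h
  rw [List.reverse_eq_nil_iff, List.dropWhile_eq_nil_iff] at h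
  intro c hc
  rcases List.mem_append.mp ((List.takeWhile_append_dropWhile (p := PySem.Chars.isspace) (l := l)) ▸ hc) with h1 | h1
  · exact List.mem_takeWhile_imp h1
  · exact h c (by simpa using h1)

theorem pvStripNeNil {c : Char} {l : List Char} (hc : c ∈ l) (hs : PySem.Chars.isspace c = false) :
    PySem.Chars.strip l ≠ [] := by
  intro h
  exact absurd (pvStripNil h c hc) (by simp [hs])

theorem pvRstripPrefix (r : List Char) : PySem.Chars.rstrip r <+: r := by
  simp only [PySem.Chars.rstrip]
  conv_rhs => rw [← List.reverse_reverse r, ← List.takeWhile_append_dropWhile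
    (p := PySem.Chars.isspace) (l := r.reverse)]
  rw [List.reverse_append]
  exact List.prefix_append _ _

theorem pvDropWhileCons {p : Char → Bool} {l r : List Char} {c : Char}
    (h : List.dropWhile p l = c :: r) : p c = false := by
  have := List.head_dropWhile_not p (l := l) (by rw [h]; simp)
  simp only [h, List.head_cons] at this
  exact this

theorem pvStripHeadCons {l rest : List Char} {c : Char}
    (hc : PySem.Chars.strip l = c :: rest) : PySem.Chars.isspace c = false := by
  obtain ⟨t, ht⟩ := pvRstripPrefix (PySem.Chars.lstrip l)
  have hd : List.dropWhile PySem.Chars.isspace l = c :: (rest ++ t) := by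
    show PySem.Chars.lstrip l = _
    rw [← ht]
    show PySem.Chars.strip l ++ t = _
    rw [hc]; simp
  exact pvDropWhileCons hd

theorem pvStripLastCons {l init : List Char} {z : Char}
    (hz : PySem.Chars.strip l = init ++ [z]) : PySem.Chars.isspace z = false := by
  have hd : List.dropWhile PySem.Chars.isspace (PySem.Chars.lstrip l).reverse
      = z :: init.reverse := by
    have h2 : List.dropWhile PySem.Chars.isspace (PySem.Chars.lstrip l).reverse
        = (PySem.Chars.rstrip (PySem.Chars.lstrip l)).reverse := by
      simp [PySem.Chars.rstrip]
    rw [h2]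
    show (PySem.Chars.strip l).reverse = _
    rw [hz]; simp
  exact pvDropWhileCons hd

theorem pvStripIdem (l : List Char) : PySem.Chars.strip (PySem.Chars.strip l) = PySem.Chars.strip l := by
  by_cases h : PySem.Chars.strip l = []
  · rw [h]; rfl
  · obtain ⟨c, rest, hc⟩ := List.exists_cons_of_ne_nil h
    have hcs := pvStripHeadCons hc
    have hz : PySem.Chars.strip l = (PySem.Chars.strip l).dropLast ++ [(PySem.Chars.strip l).getLast h] :=
      (List.dropLast_append_getLast h).symm
    have hzs := pvStripLastCons hz
    show PySem.Chars.rstrip (PySem.Chars.lstrip (PySem.Chars.strip l)) = _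
    have h1 : PySem.Chars.lstrip (PySem.Chars.strip l) = PySem.Chars.strip l := by
      show List.dropWhile _ _ = _
      rw [hc]; simp [hcs]
    rw [h1]
    show (List.dropWhile PySem.Chars.isspace (PySem.Chars.strip l).reverse).reverse = _
    conv_lhs => rw [hz]
    simp [hzs]
    exact hz.symm

def pvSep : List Char := ['\n', '\n']

def pvSplit : List Char → List Char → List (List Char)
  | pre, [] => [pre]
  | pre, c :: rest =>
    if pvSep.isPrefixOf (c :: rest) then pre :: pvSplit [] (rest.drop 1)
    else pvSplit (pre ++ [c]) rest
termination_by _ l => l.length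
decreasing_by all_goals simp

theorem pvSplit_nil (pre : List Char) : pvSplit pre [] = [pre] := by rw [pvSplit.eq_def]

theorem pvSplit_cons (pre : List Char) (c : Char) (rest : List Char) :
    pvSplit pre (c :: rest) =
      if pvSep.isPrefixOf (c :: rest) then pre :: pvSplit [] (rest.drop 1)
      else pvSplit (pre ++ [c]) rest := by rw [pvSplit.eq_def]

theorem pvSplitOnGoEq : ∀ (fuel : Nat) (l cur : List Char) (acc : List (List Char)),
    l.length < fuel →
    PySem.Chars.splitOn.go pvSep fuel l cur acc = acc.reverse ++ pvSplit cur.reverse l := by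
  intro fuel
  induction fuel with
  | zero => intro l cur acc h; omega
  | succ n ih =>
    intro l cur acc h
    cases l with
    | nil =>
      rw [PySem.Chars.splitOn.go.eq_def, pvSplit_nil]
      simp
    | cons c rest =>
      rw [PySem.Chars.splitOn.go.eq_def]
      simp only []
      by_cases hp : pvSep.isPrefixOf (c :: rest)
      · rw [if_pos hp, pvSplit_cons, if_pos hp]
        have hlen : (List.drop pvSep.length (c :: rest)).length < n := by
          simp [pvSep] at h ⊢; omega
        rw [ih _ _ _ hlen]
        have : List.drop pvSep.length (c :: rest) = rest.drop 1 := by simp [pvSep]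
        rw [this]
        simp
      · rw [if_neg hp, pvSplit_cons, if_neg hp]
        rw [ih _ _ _ (by simp at h ⊢; omega)]
        simp

theorem pvSplitOnEq (s : List Char) : PySem.Chars.splitOn s pvSep = pvSplit [] s := by
  show PySem.Chars.splitOn.go pvSep (s.length + 1) s [] [] = _
  rw [pvSplitOnGoEq _ _ _ _ (by omega)]
  simp

-- intercalate helpers
theorem pvInterSingle {α : Type} (sep : List α) (a : List α) :
    List.intercalate sep [a] = a := by
  simp [List.intercalate, List.intersperse]

theorem pvInterCons {α : Type} (sep : List α) (a : List α) (B : List (List α)) (h : B ≠ []) :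
    List.intercalate sep (a :: B) = a ++ sep ++ List.intercalate sep B := by
  cases B with
  | nil => simp at h
  | cons b B' =>
    simp [List.intercalate, List.intersperse]

theorem pvInterAppend {α : Type} (sep : List α) (A B : List (List α)) (hA : A ≠ []) (hB : B ≠ []) :
    List.intercalate sep (A ++ B) = List.intercalate sep A ++ sep ++ List.intercalate sep B := by
  induction A with
  | nil => simp at hA
  | cons a A' ih =>
    cases A' with
    | nil => simp [pvInterCons sep a B hB, pvInterSingle]
    | cons a' A'' =>
      rw [List.cons_append, pvInterCons sep a (a' :: A'' ++ B) (by simp),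
        pvInterCons sep a (a' :: A'') (by simp), ih (by simp)]
      simp

theorem pvInterNeNil {α : Type} (sep : List α) (a : List α) (B : List (List α)) (ha : a ≠ []) :
    List.intercalate sep (a :: B) ≠ [] := by
  cases B with
  | nil => simpa [pvInterSingle]
  | cons b B' => rw [pvInterCons sep a (b :: B') (by simp)]; simp [ha]

-- chain lemmas
def pvR (a b : Char) : Prop := a ≠ '\n' ∨ b ≠ '\n'

theorem pvNfChain {X : List Char} (h : ∀ c ∈ X, c ≠ '\n') :
    List.IsChain pvR (X ++ ['\n']) := by
  induction X with
  | nil => simp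
  | cons c X' ih =>
    rw [List.cons_append]
    have hc : c ≠ '\n' := h c (by simp)
    cases X' with
    | nil => exact List.isChain_cons_cons.mpr ⟨Or.inl hc, by simp⟩
    | cons d t =>
      rw [List.cons_append]
      exact List.isChain_cons_cons.mpr ⟨Or.inl hc,
        by rw [← List.cons_append]; exact ih (fun x hx => h x (by simp [hx]))⟩

theorem pvChainJ {g : List (List Char)} (hg : g ≠ [])
    (hl : ∀ l ∈ g, l ≠ [] ∧ ∀ c ∈ l, c ≠ '\n') :
    List.IsChain pvR (List.intercalate ['\n'] g ++ ['\n']) := by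
  induction g with
  | nil => simp at hg
  | cons a g' ih =>
    cases g' with
    | nil =>
      rw [pvInterSingle]
      exact pvNfChain (hl a (by simp)).2
    | cons b g'' =>
      rw [pvInterCons _ a (b :: g'') (by simp)]
      have hrw : (a ++ ['\n'] ++ List.intercalate ['\n'] (b :: g'')) ++ ['\n']
          = (a ++ ['\n']) ++ (List.intercalate ['\n'] (b :: g'') ++ ['\n']) := by simp
      rw [hrw, List.isChain_append]
      refine ⟨pvNfChain (hl a (by simp)).2, ih (by simp) (fun l hlm => hl l (by simp [hlm])), ?_⟩
      intro x hx y hy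
      right
      obtain ⟨bc, brest, hb⟩ := List.exists_cons_of_ne_nil (hl b (by simp)).1
      have hhead : (List.intercalate ['\n'] (b :: g'') ++ ['\n']).head? = some bc := by
        cases g'' with
        | nil => rw [pvInterSingle, hb]; simp
        | cons c g''' => rw [pvInterCons _ b (c :: g''') (by simp), hb]; simp
      rw [hhead] at hy
      simp at hy; subst hy
      exact (hl b (by simp)).2 bc (by simp [hb])

theorem pvSepPrefixIff (c : Char) (rest : List Char) :
    pvSep.isPrefixOf (c :: rest) = true ↔ c = '\n' ∧ ∃ r', rest = '\n' :: r' := by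
  cases rest with
  | nil => simp [pvSep, List.isPrefixOf]
  | cons d r =>
    simp [pvSep, List.isPrefixOf]
    exact ⟨fun h => ⟨h.1.symm, h.2.symm⟩, fun h => ⟨h.1.symm, h.2.symm⟩⟩

theorem pvSplitSkip : ∀ (X : List Char), List.IsChain pvR (X ++ ['\n']) →
    ∀ (pre Y : List Char), pvSplit pre (X ++ pvSep ++ Y) = (pre ++ X) :: pvSplit [] Y := by
  intro X
  induction X with
  | nil =>
    intro _ pre Y
    show pvSplit pre ('\n' :: ('\n' :: Y)) = _
    rw [pvSplit_cons, if_pos (by rw [pvSepPrefixIff]; exact ⟨rfl, Y, rfl⟩)]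
    simp
  | cons c X' ih =>
    intro hch pre Y
    rw [List.cons_append] at hch
    have hnp : ¬ pvSep.isPrefixOf (c :: (X' ++ pvSep ++ Y)) := by
      rw [pvSepPrefixIff]
      rintro ⟨hc, r', hr⟩
      subst hc
      cases X' with
      | nil =>
        rw [List.nil_append] at hch
        rcases List.isChain_cons_cons.mp hch with ⟨h1 | h1, -⟩ <;> exact h1 rfl
      | cons d t =>
        simp only [List.cons_append] at hr
        have hd : d = '\n' := by injection hr
        subst hd
        rw [List.cons_append] at hch
        rcases List.isChain_cons_cons.mp hch with ⟨h1 | h1, -⟩ <;> exact h1 rfl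
    rw [List.cons_append, List.cons_append, pvSplit_cons, if_neg (by simpa using hnp),
      ih hch.tail (pre ++ [c]) Y]
    simp

theorem pvSplitAll : ∀ (Z : List Char), List.IsChain pvR Z →
    ∀ pre, pvSplit pre Z = [pre ++ Z] := by
  intro Z
  induction Z with
  | nil => intro _ pre; rw [pvSplit_nil]; simp
  | cons c Z' ih =>
    intro hch pre
    have hnp : ¬ pvSep.isPrefixOf (c :: Z') := by
      rw [pvSepPrefixIff]
      rintro ⟨hc, r', hr⟩
      subst hc; subst hr
      rcases List.isChain_cons_cons.mp hch with ⟨h1 | h1, _⟩ <;> exact h1 rfl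
    rw [pvSplit_cons, if_neg (by simpa using hnp), ih hch.tail (pre ++ [c])]
    simp

def pvCollapse : List Char → List (List Char) → List (List Char)
  | _, [] => []
  | prev, l :: rest =>
    if l ≠ [] ∨ prev ≠ [] then l :: pvCollapse l rest else pvCollapse l rest

def pvGrp : List (List Char) → List (List Char) → List (List (List Char))
  | [], cur => if cur = [] then [] else [cur]
  | l :: rest, cur =>
    if l = [] then (if cur = [] then pvGrp rest [] else cur :: pvGrp rest [])
    else pvGrp rest (cur ++ [l])

theorem pvGrpNe : ∀ (M cur : List (List Char)), ((∃ l ∈ M, l ≠ []) ∨ cur ≠ []) →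
    pvGrp M cur ≠ [] := by
  intro M
  induction M with
  | nil =>
    intro cur h
    rcases h with h | h
    · simp at h
    · simp [pvGrp, h]
  | cons l rest ih =>
    intro cur h
    show pvGrp (l :: rest) cur ≠ []
    rw [pvGrp]
    by_cases hl : l = []
    · rw [if_pos hl]
      have hrest : (∃ x ∈ rest, x ≠ []) ∨ cur ≠ [] := by
        rcases h with ⟨x, hx, hxne⟩ | h
        · rcases List.mem_cons.mp hx with h1 | h1
          · exact absurd (h1 ▸ hxne) (by simp [hl])
          · exact Or.inl ⟨x, h1, hxne⟩
        · exact Or.inr h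
      by_cases hc : cur = []
      · rw [if_pos hc]
        rcases hrest with hr | hr
        · exact ih [] (Or.inl hr)
        · exact absurd hc hr
      · rw [if_neg hc]; simp
    · rw [if_neg hl]
      exact ih (cur ++ [l]) (Or.inr (by simp))

theorem pvGrpFacts : ∀ (M cur : List (List Char)),
    (∀ l ∈ M, ∀ c ∈ l, c ≠ '\n') → (∀ l ∈ cur, l ≠ [] ∧ ∀ c ∈ l, c ≠ '\n') →
    ∀ g ∈ pvGrp M cur, g ≠ [] ∧ ∀ l ∈ g, l ≠ [] ∧ ∀ c ∈ l, c ≠ '\n' := by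
  intro M
  induction M with
  | nil =>
    intro cur _ hcur g hg
    by_cases hc : cur = [] <;> simp [pvGrp, hc] at hg
    subst hg
    exact ⟨hc, hcur⟩
  | cons l rest ih =>
    intro cur hM hcur g hg
    rw [pvGrp] at hg
    by_cases hl : l = []
    · rw [if_pos hl] at hg
      by_cases hc : cur = []
      · rw [if_pos hc] at hg
        exact ih [] (fun x hx => hM x (by simp [hx])) (by simp) g hg
      · rw [if_neg hc] at hg
        rcases List.mem_cons.mp hg with h1 | h1
        · subst h1; exact ⟨hc, hcur⟩
        · exact ih [] (fun x hx => hM x (by simp [hx])) (by simp) g h1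
    · rw [if_neg hl] at hg
      refine ih (cur ++ [l]) (fun x hx => hM x (by simp [hx])) ?_ g hg
      intro x hx
      rcases List.mem_append.mp hx with h1 | h1
      · exact hcur x h1
      · have hx2 : x = l := by simpa using h1
        subst hx2
        exact ⟨hl, hM x (by simp)⟩

theorem pvLast?Cons {a : List Char} {l : List (List Char)} (h : l ≠ []) :
    (a :: l).getLast? = l.getLast? := by
  cases l with
  | nil => simp at h
  | cons b t => simp [List.getLast?_cons_cons]

theorem pvLastNonempty {rest : List (List Char)} (hrne : rest ≠ [])
    (hl : rest.getLast? ≠ some []) : ∃ x ∈ rest, x ≠ [] := by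
  refine ⟨rest.getLast hrne, List.getLast_mem hrne, ?_⟩
  intro h
  exact hl (by rw [List.getLast?_eq_getLast_of_ne_nil hrne, h])

theorem pvPQ : ∀ (M : List (List Char)) (cur : List (List Char)) (prev : List Char),
    M.getLast? ≠ some [] → (cur = [] ↔ prev = []) →
    List.intercalate [([] : List Char)] (pvGrp M cur) = cur ++ pvCollapse prev M := by
  intro M
  induction M with
  | nil =>
    intro cur prev _ _
    by_cases hc : cur = [] <;> simp [pvGrp, pvCollapse, hc, List.intercalate]
  | cons l rest ih =>
    intro cur prev hlast hiff
    rw [pvGrp, pvCollapse]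
    by_cases hl : l = []
    · rw [if_pos hl]
      have hrne : rest ≠ [] := by
        intro h; subst h; subst hl; simp at hlast
      have hlast' : rest.getLast? ≠ some [] := by
        rwa [pvLast?Cons hrne] at hlast
      by_cases hc : cur = []
      · rw [if_pos hc]
        have hprev : prev = [] := hiff.mp hc
        rw [if_neg (by simp [hl, hprev])]
        rw [ih [] [] hlast' (by simp)]
        simp [hc, hl]
      · rw [if_neg hc]
        have hprev : prev ≠ [] := fun h => hc (hiff.mpr h)
        rw [if_pos (Or.inr hprev)]
        have hgne : pvGrp rest [] ≠ [] :=
          pvGrpNe rest [] (Or.inl (pvLastNonempty hrne hlast'))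
        rw [pvInterCons _ cur (pvGrp rest []) hgne, ih [] [] hlast' (by simp)]
        simp [hl]
    · rw [if_neg hl, if_pos (Or.inl hl)]
      have hlast'' : rest.getLast? ≠ some [] := by
        cases rest with
        | nil => simp
        | cons r rs => rwa [pvLast?Cons (by simp)] at hlast
      rw [ih (cur ++ [l]) l hlast'' (by simp [hl])]
      simp

theorem pvSplitJoin : ∀ (gs : List (List (List Char))), gs ≠ [] →
    (∀ g ∈ gs, g ≠ [] ∧ ∀ l ∈ g, l ≠ [] ∧ ∀ c ∈ l, c ≠ '\n') →
    pvSplit [] (List.intercalate ['\n'] (List.intercalate [([] : List Char)] gs))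
      = gs.map (List.intercalate ['\n']) := by
  intro gs
  induction gs with
  | nil => intro h; simp at h
  | cons g gs' ih =>
    intro _ hfacts
    cases gs' with
    | nil =>
      rw [pvInterSingle]
      have hch : List.IsChain pvR (List.intercalate ['\n'] g) :=
        (pvChainJ (hfacts g (by simp)).1 (hfacts g (by simp)).2).prefix (by simp)
      rw [pvSplitAll _ hch []]
      simp [pvInterSingle]
    | cons g2 gs'' =>
      have hgne : g ≠ [] := (hfacts g (by simp)).1
      have hI'ne : List.intercalate [([] : List Char)] (g2 :: gs'') ≠ [] := by
        cases gs'' with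
        | nil => rw [pvInterSingle]; exact (hfacts g2 (by simp)).1
        | cons g3 t => exact pvInterNeNil _ _ _ (hfacts g2 (by simp)).1
      rw [pvInterCons _ g (g2 :: gs'') (by simp)]
      have hsplit : List.intercalate ['\n'] (g ++ [([] : List Char)] ++ List.intercalate [[]] (g2 :: gs''))
          = List.intercalate ['\n'] g ++ pvSep
            ++ List.intercalate ['\n'] (List.intercalate [[]] (g2 :: gs'')) := by
        rw [show g ++ [([] : List Char)] ++ List.intercalate [[]] (g2 :: gs'')
            = g ++ ([([] : List Char)] ++ List.intercalate [[]] (g2 :: gs'')) from by simp,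
          pvInterAppend _ g _ hgne (by simp),
          show ([([] : List Char)] ++ List.intercalate [[]] (g2 :: gs''))
            = [] :: List.intercalate [[]] (g2 :: gs'') from rfl,
          pvInterCons _ [] _ hI'ne]
        simp [pvSep]
      rw [hsplit, pvSplitSkip _ (pvChainJ hgne (hfacts g (by simp)).2) [] _,
        ih (by simp) (fun g' hg' => hfacts g' (by simp [hg']))]
      simp

theorem pvOfListEqEmpty (x : List Char) : (String.ofList x = "") ↔ x = [] := by
  constructor
  · intro h
    have := congrArg String.toList h
    simpa using this
  · rintro rfl; rfl

theorem pvIdxCore : ∀ (M : List (List Char)) (prev : List Char),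
    ((List.range M.length).filter (fun k =>
        decide (M.getD k [] ≠ []) || decide ((if k = 0 then prev else M.getD (k - 1) []) ≠ []))).map
      (fun k => M.getD k [])
    = pvCollapse prev M := by
  intro M
  induction M with
  | nil => intro prev; simp [pvCollapse]
  | cons l R ih =>
    intro prev
    rw [List.length_cons, List.range_succ_eq_map, List.filter_cons]
    have hfc : (fun k => decide ((l :: R).getD k [] ≠ []) ||
          decide ((if k = 0 then prev else (l :: R).getD (k - 1) []) ≠ [])) ∘ Nat.succ
        = (fun k => decide (R.getD k [] ≠ []) || decide ((if k = 0 then l else R.getD (k - 1) []) ≠ [])) := by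
      funext k
      simp only [Function.comp_apply, Nat.succ_eq_add_one, List.getD_cons_succ]
      congr 1
      cases k with
      | zero => simp
      | succ k' => simp
    by_cases h0 : l ≠ [] ∨ prev ≠ []
    · rw [if_pos (by rcases h0 with h | h <;> simp [h])]
      rw [List.map_cons, List.filter_map, List.map_map, hfc]
      have hmf : ((fun k => (l :: R).getD k []) ∘ Nat.succ) = (fun k => R.getD k []) := by
        funext k; simp
      rw [hmf, ih l]
      simp [pvCollapse, h0]
    · rw [if_neg (by push Not at h0; simp [h0.1, h0.2])]
      rw [List.filter_map, List.map_map, hfc]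
      have hmf : ((fun k => (l :: R).getD k []) ∘ Nat.succ) = (fun k => R.getD k []) := by
        funext k; simp
      rw [hmf, ih l]
      rw [pvCollapse, if_neg h0]

theorem pvPair (bs : List String) (h : bs.length % 2 = 0) :
    (PySem.List.pyRange 1 (bs.length : Int) 2).map
      (fun i => ((PySem.List.pyGet? bs (i - 1)).getD "", (PySem.List.pyGet? bs i).getD ""))
    = (PySem.List.pyRange 0 (bs.length : Int) 2).map
      (fun i => ((PySem.List.pyGet? bs i).getD "", (PySem.List.pyGet? bs (i + 1)).getD "")) := by
  obtain ⟨m, hm⟩ : ∃ m, bs.length = 2 * m := ⟨bs.length / 2, by omega⟩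
  rw [PySem.List.pyRange_of_pos _ _ (by norm_num), PySem.List.pyRange_of_pos _ _ (by norm_num)]
  rcases Nat.eq_zero_or_pos m with hm0 | hmpos
  · subst hm0
    rw [if_neg (by omega), if_neg (by omega)]
    simp
  · rw [if_pos (by omega), if_pos (by omega)]
    have h1 : (((bs.length : Int) - 1 + 2 - 1) / 2).toNat = m := by omega
    have h2 : (((bs.length : Int) - 0 + 2 - 1) / 2).toNat = m := by omega
    rw [h1, h2, List.map_map, List.map_map]
    apply List.map_congr_left
    intro k hk
    simp only [Function.comp_apply]
    have e1 : (1 : Int) + 2 * (k : Int) - 1 = ((2 * k : Nat) : Int) := by push_cast; ring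
    have e2 : (1 : Int) + 2 * (k : Int) = ((2 * k + 1 : Nat) : Int) := by push_cast; ring
    have e3 : (0 : Int) + 2 * (k : Int) = ((2 * k : Nat) : Int) := by push_cast; ring
    have e4 : (0 : Int) + 2 * (k : Int) + 1 = ((2 * k + 1 : Nat) : Int) := by push_cast; ring
    rw [e1, e2, e3]
    norm_cast

theorem pvStrStripOfList (l : List Char) :
    PySem.Str.strip (String.ofList l) = String.ofList (PySem.Chars.strip l) := by
  show String.ofList (PySem.Chars.strip (String.ofList l).toList) = _
  rw [String.toList_ofList]

theorem pvNlToList : ("\n" : String).toList = ['\n'] := by decide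

theorem pvStrJoinOfList (cur : List (List Char)) :
    PySem.Str.join "\n" (cur.map String.ofList) = String.ofList (List.intercalate ['\n'] cur) := by
  show String.ofList (PySem.Chars.join ("\n" : String).toList ((cur.map String.ofList).map String.toList)) = _
  rw [pvNlToList]
  congr 1
  show List.intercalate ['\n'] _ = _
  congr 1
  rw [List.map_map]
  rw [show String.toList ∘ String.ofList = id from funext (fun x => String.toList_ofList), List.map_id]

theorem pvSplitlinesStr (td : String) :
    PySem.Str.splitlines (PySem.Str.strip td)
      = (PySem.Chars.splitlines (PySem.Chars.strip td.toList)).map String.ofList := by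
  show (PySem.Chars.splitlines ((PySem.Str.strip td).toList)).map _ = _
  rw [show (PySem.Str.strip td).toList = PySem.Chars.strip td.toList from by
    show (String.ofList _).toList = _; rw [String.toList_ofList]]

theorem pvStrSplitNN (s : String) :
    (PySem.Str.split? s "\n\n").getD [] = (PySem.Chars.splitOn s.toList pvSep).map String.ofList := by
  show (Option.map _ (PySem.Chars.split? s.toList ("\n\n" : String).toList)).getD [] = _
  rw [show ("\n\n" : String).toList = pvSep from by decide]
  simp [PySem.Chars.split?, pvSep]

theorem pvGetBridge (L : List (List Char)) (k : Nat) (hk : k < L.length) :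
    (PySem.List.pyGet? (L.map String.ofList) ((k : Nat) : Int)).getD "" = String.ofList (L.getD k []) := by
  rw [PySem.List.pyGet?_natCast, List.getElem?_map, List.getElem?_eq_getElem hk]
  simp [List.getD_eq_getElem?_getD, List.getElem?_eq_getElem hk]

set_option maxHeartbeats 1000000 in
theorem pvFoldEq : ∀ (cl : List (List Char)) (bs : List String) (cur : List (List Char)),
    (if ((cl.map String.ofList).foldl pvGroupStep (bs, cur.map String.ofList)).2 ≠ [] then
       ((cl.map String.ofList).foldl pvGroupStep (bs, cur.map String.ofList)).1
         ++ [PySem.Str.join "\n" ((cl.map String.ofList).foldl pvGroupStep (bs, cur.map String.ofList)).2]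
     else ((cl.map String.ofList).foldl pvGroupStep (bs, cur.map String.ofList)).1)
    = bs ++ (pvGrp (cl.map PySem.Chars.strip) cur).map (fun g => String.ofList (List.intercalate ['\n'] g)) := by
  intro cl
  induction cl with
  | nil =>
    intro bs cur
    simp only [List.map_nil, List.foldl_nil]
    by_cases hc : cur = []
    · subst hc
      rw [if_neg (by simp)]
      rw [show pvGrp ([] : List (List Char)) [] = [] from by rw [pvGrp]; simp]
      simp
    · rw [if_pos (by simpa using hc)]
      rw [pvGrp, if_neg hc, pvStrJoinOfList]
      simp
  | cons l cl' ih =>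
    intro bs cur
    simp only [List.map_cons, List.foldl_cons]
    have hstep : pvGroupStep (bs, cur.map String.ofList) (String.ofList l)
        = if PySem.Chars.strip l ≠ [] then (bs, (cur ++ [PySem.Chars.strip l]).map String.ofList)
          else if cur ≠ [] then (bs ++ [PySem.Str.join "\n" (cur.map String.ofList)], ([] : List (List Char)).map String.ofList)
          else (bs, cur.map String.ofList) := by
      unfold pvGroupStep
      rw [pvStrStripOfList]
      by_cases hs : PySem.Chars.strip l = [] <;> by_cases hc : cur = [] <;>
        simp [hs, hc, pvOfListEqEmpty]
    rw [hstep, pvGrp]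
    by_cases hs : PySem.Chars.strip l = []
    · rw [if_neg (not_not_intro hs), if_pos hs]
      by_cases hc : cur = []
      · rw [if_neg (not_not_intro hc), if_pos hc, hc]
        exact ih bs []
      · rw [if_pos hc, if_neg hc]
        rw [ih (bs ++ [PySem.Str.join "\n" (cur.map String.ofList)]) []]
        rw [pvStrJoinOfList]
        simp
    · rw [if_pos hs, if_neg hs]
      exact ih bs (cur ++ [PySem.Chars.strip l])

-- A-side ports (as in equiv.lean)
theorem pvStrBeqEmpty (y : List Char) : ((String.ofList y == "") : Bool) = decide (y = []) := by
  by_cases hy : y = []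
  · subst hy; rfl
  · rw [beq_eq_false_iff_ne.mpr (by simp [pvOfListEqEmpty, hy])]
    simp [hy]

theorem pvGetDMem (L : List (List Char)) (k : Nat) (hk : k < L.length) : L.getD k [] ∈ L := by
  rw [List.getD_eq_getElem L ([] : List Char) hk]
  exact List.getElem_mem hk

set_option maxHeartbeats 2000000 in
theorem pvBlocksA (td : String) :
    parse_test_data td
      = (pvGrp ((PySem.Chars.splitlines (PySem.Chars.strip td.toList)).map PySem.Chars.strip) []).map
          (fun g => String.ofList (List.intercalate ['\n'] g)) := by
  unfold parse_test_data
  rw [pvSplitlinesStr]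
  set CL := PySem.Chars.splitlines (PySem.Chars.strip td.toList) with hCL
  set L := CL.map PySem.Chars.strip with hLdef
  have hmap : (CL.map String.ofList).map (fun line => PySem.Str.strip line) = L.map String.ofList := by
    rw [hLdef, List.map_map, List.map_map]
    apply List.map_congr_left
    intro x _
    exact pvStrStripOfList x
  rw [hmap]
  by_cases hCLnil : CL = []
  · rw [if_pos (by simp [hCLnil, hLdef])]
    rw [show pvGrp L [] = [] from by rw [hLdef, hCLnil]; simp only [List.map_nil]; rw [pvGrp]; simp]
    simp
  · have hLne : L ≠ [] := by simp [hLdef, hCLnil]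
    have hsne : PySem.Chars.strip td.toList ≠ [] := by
      intro h
      exact hCLnil (by rw [hCL, h]; rfl)
    obtain ⟨c, r, hc⟩ := List.exists_cons_of_ne_nil hsne
    have hcs : PySem.Chars.isspace c = false := pvStripHeadCons hc
    have hIsBc : pvIsB c = false := by
      cases h : pvIsB c
      · rfl
      · exact absurd (pvIsB_isspace c h) (by simp [hcs])
    have hCLeq : CL = pvLines (PySem.Chars.strip td.toList) [] := by
      rw [hCL]; exact pvSplitlinesEq _
    have hcr : c ≠ '\x0d' := by
      intro h
      rw [h, show PySem.Chars.isspace '\x0d' = true from by decide] at hcs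
      cases hcs
    have h1 : pvLines (c :: r) [] = pvLines r [c] := by
      rw [pvLines_cons, if_neg (by rintro ⟨h, -⟩; exact hcr h), if_neg (by simp [hIsBc])]
    obtain ⟨pre, t, hft⟩ := pvLines_first r [c] (by simp)
    have hCLc : CL = (c :: pre) :: t := by
      rw [hCLeq, hc, h1, hft]; simp
    have hhead0 : L.getD 0 [] ≠ [] := by
      rw [hLdef, hCLc]
      simp only [List.map_cons, List.getD_cons_zero]
      exact pvStripNeNil (by simp) hcs
    -- last element fact
    have hglz : (PySem.Chars.strip td.toList).getLast? =
        some ((PySem.Chars.strip td.toList).getLast hsne) :=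
      List.getLast?_eq_getLast_of_ne_nil hsne
    have hzs : PySem.Chars.isspace ((PySem.Chars.strip td.toList).getLast hsne) = false :=
      pvStripLastCons ((List.dropLast_append_getLast hsne).symm)
    have hIsBz : pvIsB ((PySem.Chars.strip td.toList).getLast hsne) = false := by
      cases h : pvIsB ((PySem.Chars.strip td.toList).getLast hsne)
      · rfl
      · exact absurd (pvIsB_isspace _ h) (by simp [hzs])
    obtain ⟨t2, w, hlw⟩ := pvLines_last (PySem.Chars.strip td.toList) [] _ hglz hIsBz
    have hlast : L.getLast? ≠ some [] := by
      rw [hLdef, hCLeq, hlw]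
      rw [List.map_append, List.map_cons]
      simp only [List.map_nil, List.getLast?_append, List.getLast?_singleton]
      intro hcon
      simp only [Option.or_eq_some_iff] at hcon
      have : PySem.Chars.strip (w ++ [(PySem.Chars.strip td.toList).getLast hsne]) ≠ [] :=
        pvStripNeNil (by simp) hzs
      rcases hcon with h' | ⟨h', -⟩
      · exact this (by injection h')
      · exact this (by injection h')
    have hnfCL : ∀ l ∈ CL, ∀ ch ∈ l, pvIsB ch = false := by
      rw [hCLeq]
      exact pvLines_nfree _ [] (by simp)
    have hnf : ∀ l ∈ L, ∀ ch ∈ l, ch ≠ '\n' := by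
      intro l hl ch hch
      obtain ⟨m, hm, rfl⟩ := List.mem_map.mp (hLdef ▸ hl)
      intro hnl
      subst hnl
      have := hnfCL m hm '\n' (pvMemStrip hch)
      rw [pvIsB_newline] at this
      cases this
    have hidem : ∀ l ∈ L, PySem.Chars.strip l = l := by
      intro l hl
      obtain ⟨m, -, rfl⟩ := List.mem_map.mp (hLdef ▸ hl)
      exact pvStripIdem m
    -- the port body
    rw [if_neg (by simp [hLne])]
    rw [show ((L.map String.ofList).length : Int) = (L.length : Int) from by simp]
    rw [PySem.List.pyRange_zero_natCast, List.filter_map, List.map_map]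
    rw [List.filter_congr (q := fun k : Nat =>
        decide (L.getD k [] ≠ []) || decide ((if k = 0 then [] else L.getD (k - 1) []) ≠ ([] : List Char)))
      (by
        intro k hk
        rw [List.mem_range] at hk
        simp only [Function.comp_apply]
        cases k with
        | zero =>
          simp only [Nat.cast_zero, if_pos rfl]
          rw [show ((0 : Int) == 0) = true from rfl]
          have hh := hhead0
          rw [List.getD_eq_getElem?_getD] at hh
          simp [hh]
        | succ k' =>
          have hk' : k' + 1 < L.length := hk
          rw [show (((k' + 1 : Nat) : Int) == 0) = false from by
            rw [beq_eq_false_iff_ne]; omega]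
          rw [pvGetBridge L (k' + 1) hk', pvStrStripOfList,
            hidem _ (pvGetDMem L (k' + 1) hk'), pvStrBeqEmpty]
          rw [show ((k' + 1 : Nat) : Int) - 1 = ((k' : Nat) : Int) from by omega]
          rw [pvGetBridge L k' (by omega), pvStrStripOfList,
            hidem _ (pvGetDMem L k' (by omega)), pvStrBeqEmpty]
          simp)]
    rw [List.map_congr_left (f := (fun i : Int => PySem.Str.strip ((PySem.List.pyGet? (L.map String.ofList) i).getD "")) ∘ (fun k : Nat => (k : Int)))
      (g := fun k : Nat => String.ofList (L.getD k []))
      (by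
        intro k hkmem
        have hk : k < L.length := List.mem_range.mp (List.mem_of_mem_filter hkmem)
        simp only [Function.comp_apply]
        rw [pvGetBridge L k hk, pvStrStripOfList, hidem _ (pvGetDMem L k hk)])]
    rw [show (fun k : Nat => String.ofList (L.getD k []))
        = String.ofList ∘ (fun k : Nat => L.getD k []) from rfl]
    rw [← List.map_map (g := String.ofList) (f := fun k : Nat => L.getD k [])]
    rw [pvIdxCore L []]
    show (PySem.Str.split? (PySem.Str.join "\n" (List.map String.ofList (pvCollapse [] L))) "\n\n").getD []
      = List.map (fun g => String.ofList (List.intercalate ['\n'] g)) (pvGrp L [])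
    rw [pvStrJoinOfList, pvStrSplitNN, String.toList_ofList, pvSplitOnEq]
    have hPQ : pvCollapse [] L = List.intercalate [([] : List Char)] (pvGrp L []) := by
      rw [pvPQ L [] [] hlast (by simp)]
      simp
    rw [hPQ]
    have hgsne : pvGrp L [] ≠ [] :=
      pvGrpNe L [] (Or.inl ⟨L.getD 0 [], pvGetDMem L 0 (List.length_pos_of_ne_nil hLne), hhead0⟩)
    rw [pvSplitJoin (pvGrp L []) hgsne (pvGrpFacts L [] hnf (by simp))]
    rw [List.map_map]
    rfl

def pvTailA (bs : List String) : List (String × String) :=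
  if bs = [] then []
  else
    let t2 := if bs.length % 2 ≠ 0 then bs ++ [""] else bs
    (PySem.List.pyRange 1 (t2.length : Int) 2).map
      (fun i => ((PySem.List.pyGet? t2 (i - 1)).getD "", (PySem.List.pyGet? t2 i).getD ""))

def pvTailB (bs : List String) : List (String × String) :=
  if bs = [] then []
  else
    let t2 := if bs.length % 2 ≠ 0 then bs ++ [""] else bs
    (PySem.List.pyRange 0 (t2.length : Int) 2).map
      (fun i => ((PySem.List.pyGet? t2 i).getD "", (PySem.List.pyGet? t2 (i + 1)).getD ""))

theorem pvTailAB (bs : List String) : pvTailA bs = pvTailB bs := by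
  unfold pvTailA pvTailB
  by_cases hb : bs = []
  · rw [if_pos hb, if_pos hb]
  · rw [if_neg hb, if_neg hb]
    apply pvPair
    by_cases hodd : bs.length % 2 ≠ 0
    · rw [if_pos hodd]; simp; omega
    · rw [if_neg hodd]; omega

set_option maxHeartbeats 2000000 in
theorem pvMain (td : String) : parse_test_data_as_stream td = parse_test_data_as_stream_alt td := by
  have hA : parse_test_data_as_stream td = pvTailA (parse_test_data td) := rfl
  have hBd : parse_test_data_as_stream_alt td = pvTailB
      (if (((PySem.Str.splitlines (PySem.Str.strip td)).foldl pvGroupStep ([], [])).2 ≠ []) then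
        (((PySem.Str.splitlines (PySem.Str.strip td)).foldl pvGroupStep ([], [])).1
          ++ [PySem.Str.join "\n" (((PySem.Str.splitlines (PySem.Str.strip td)).foldl pvGroupStep ([], [])).2)])
      else ((PySem.Str.splitlines (PySem.Str.strip td)).foldl pvGroupStep ([], [])).1) := rfl
  rw [hA, hBd, pvBlocksA td, pvTailAB]
  congr 1
  rw [pvSplitlinesStr]
  have h := pvFoldEq (PySem.Chars.splitlines (PySem.Chars.strip td.toList)) [] []
  simp only [List.map_nil] at h
  rw [h]
  simp

-- ===== VERDICT (by name: the statement is the Claim_ definition above) =====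
theorem parse_test_data_as_stream_spec : Claim_equal_parse_test_data_as_stream := by
  intro td _
  unfold Spec_parse_test_data_as_stream
  exact pvMain td
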